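-- pv_equiv track=rewrite | github.com/danyweis/Openclassrooms | Python/chapitre2/hangman/correctionOPC/fonctions.py | recupMotMasque
-- ===== SOURCE A (Python) =====
-- def recupMotMasque(motComplet, lettresTrouves):
--     """ Cette fonction renvoie un mot masque tout ou en partie, en fonction:
--     - du mot d'origine (type str)
--     - des lettres deja trouvees (type list)
--     On renvoie le mot d'origine avec des * remplacant
--     des lettres que l'on n'a pas encore trouvees"""
--
--     motMasque = ""
--     for lettre in motComplet:
--         if lettre in lettresTrouves:
--             motMasque += lettre
--         else:
--             motMasque += "*"
--     return motMasque
-- ===== SOURCE B (Python) =====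
-- def recupMotMasque(motComplet, lettresTrouves):
--     positions = {}
--     for i, c in enumerate(motComplet):
--         positions.setdefault(c, []).append(i)
--     result = ["*"] * len(motComplet)
--     # order of iteration over the set is irrelevant: distinct guesses reveal
--     # disjoint position sets
--     for lettre in set(lettresTrouves):
--         for i in positions.get(lettre, []):
--             result[i] = lettre
--     return "".join(result)
-- ===== Notes on version B (the rewrite author's own statement) =====
-- stated objective: faster
-- what changed: Inverts the loop nesting and removes both inner scans: B indexes the word's positions by character in one dict pass, deduplicates the guesses with a set, and reveals each guessed letter's positions directly, instead of A's per-character linear membership scan of the guess list.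
import Mathlib
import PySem

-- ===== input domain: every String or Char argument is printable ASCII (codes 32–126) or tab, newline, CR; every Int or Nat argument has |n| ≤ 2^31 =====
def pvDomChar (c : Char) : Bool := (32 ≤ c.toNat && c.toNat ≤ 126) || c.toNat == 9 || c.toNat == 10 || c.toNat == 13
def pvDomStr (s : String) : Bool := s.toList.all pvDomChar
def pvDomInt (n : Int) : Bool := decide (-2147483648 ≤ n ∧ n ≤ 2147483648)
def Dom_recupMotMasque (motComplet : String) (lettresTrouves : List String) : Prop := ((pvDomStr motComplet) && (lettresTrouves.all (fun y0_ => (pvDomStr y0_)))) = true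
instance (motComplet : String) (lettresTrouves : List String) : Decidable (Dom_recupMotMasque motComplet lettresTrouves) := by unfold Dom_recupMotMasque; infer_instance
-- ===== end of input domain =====

-- B replaces A's per-character membership scan of the guess list by a one-pass
-- position index of the word plus a deduplicated reveal pass over the guesses
-- (objective: faster).

-- ===== PORT A =====
-- one pass over the word: each character is kept if its 1-char string is in lettresTrouves
def recupMotMasque (motComplet : String) (lettresTrouves : List String) : String :=
  motComplet.toList.foldl
    (fun motMasque lettre =>
      if (String.ofList [lettre]) ∈ lettresTrouves then motMasque.push lettre
      else motMasque.push '*')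
    ""

-- ===== PORT B =====
-- positions.setdefault(c, []).append(i)  =  d[c] = d.get(c, []) + [i]  =  Dict.modify;
-- 'for lettre in set(lettresTrouves)' is ported in first-occurrence order: the result
-- does not depend on the iteration order (distinct guesses reveal disjoint positions);
-- the enumerate indices are ≥ 0, so .toNat on them is exact.
def recupMotMasque_alt (motComplet : String) (lettresTrouves : List String) : String :=
  let positions : PySem.Dict String (List Int) :=
    (PySem.List.enumerate motComplet.toList 0).foldl
      (fun d p => d.modify (String.ofList [p.2]) [] (fun xs => xs ++ [p.1]))
      PySem.Dict.empty
  let result : List String :=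
    (PySem.Set.ofList lettresTrouves).foldl
      (fun res lettre =>
        (positions.getD lettre []).foldl (fun r i => r.set i.toNat lettre) res)
      (List.replicate motComplet.toList.length "*")
  PySem.Str.join "" result

-- ===== PRECONDITION & SPEC =====
def Spec_recupMotMasque (motComplet : String) (lettresTrouves : List String) (out : String) : Prop := out = recupMotMasque_alt motComplet lettresTrouves
instance (motComplet : String) (lettresTrouves : List String) (out : String) : Decidable (Spec_recupMotMasque motComplet lettresTrouves out) := by unfold Spec_recupMotMasque; infer_instance

-- ===== CLAIM (what is proved, stated in full; the proofs are below) =====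
def Claim_equal_recupMotMasque : Prop := ∀ (motComplet : String) (lettresTrouves : List String), Dom_recupMotMasque motComplet lettresTrouves → Spec_recupMotMasque motComplet lettresTrouves (recupMotMasque motComplet lettresTrouves)

-- ===== LEMMAS AND PROOFS =====

-- A's fold, characterised as a map on the character list
lemma fold_word (l : List String) :
    ∀ (cs : List Char) (acc : String),
      cs.foldl
        (fun motMasque lettre =>
          if (String.ofList [lettre]) ∈ l then motMasque.push lettre
          else motMasque.push '*')
        acc
        = String.ofList (acc.toList ++ cs.map (fun c => if String.ofList [c] ∈ l then c else '*')) := by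
  intro cs
  induction cs with
  | nil => intro acc; simp [String.ofList_toList]
  | cons c cs ih =>
    intro acc
    by_cases h : String.ofList [c] ∈ l <;>
      simp [h, ih, String.toList_push]

-- the index list a guess g gets from the position dict built over ps
def idxOf (ps : List (Int × Char)) (g : String) : List Int :=
  ps.filterMap (fun p => if String.ofList [p.2] = g then some p.1 else none)

-- the dict-building fold, characterised per key
lemma build_positions (ps : List (Int × Char)) :
    ∀ (d : PySem.Dict String (List Int)) (g : String),
      ((ps.foldl (fun d p => d.modify (String.ofList [p.2]) [] (fun xs => xs ++ [p.1])) d).getD g [])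
        = d.getD g [] ++ idxOf ps g := by
  induction ps with
  | nil => intro d g; simp [idxOf]
  | cons p ps ih =>
    intro d g
    rw [List.foldl_cons, ih]
    by_cases h : String.ofList [p.2] = g
    · rw [h, PySem.Dict.getD_modify_self]
      simp [idxOf, h]
    · rw [PySem.Dict.getD_modify_of_ne]
      · simp [idxOf, h]
      · exact fun hg => h hg.symm

-- membership in the index list of g
lemma mem_idxOf (cs : List Char) (g : String) (j : Int) :
    j ∈ idxOf (PySem.List.enumerate cs 0) g
      ↔ ∃ (k : Nat) (h : k < cs.length), j = (k : Int) ∧ String.ofList [cs[k]] = g := by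
  unfold idxOf
  simp only [List.mem_filterMap, PySem.List.mem_enumerate_iff]
  constructor
  · rintro ⟨p, ⟨k, hk, rfl⟩, hp⟩
    by_cases h : String.ofList [cs[k]] = g
    · exact ⟨k, hk, by simpa using (Option.some_inj.mp (by simpa [h] using hp)).symm, h⟩
    · simp [h] at hp
  · rintro ⟨k, hk, rfl, hg⟩
    exact ⟨(0 + (k : Int), cs[k]), ⟨k, hk, rfl⟩, by simp [hg]⟩

-- the inner reveal fold, read pointwise (indices all ≥ 0)
lemma foldl_set_getElem? (g : String) :
    ∀ (I : List Int) (res : List String), (∀ i ∈ I, 0 ≤ i) → ∀ (j : Nat), j < res.length →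
      (I.foldl (fun r i => r.set i.toNat g) res)[j]? = if (j : Int) ∈ I then some g else res[j]? := by
  intro I
  induction I with
  | nil => intro res _ j hj; simp
  | cons i I ih =>
    intro res hpos j hj
    rw [List.foldl_cons, ih (res.set i.toNat g) (fun x hx => hpos x (List.mem_cons_of_mem i hx)) j (by simpa using hj)]
    by_cases hmem : (j : Int) ∈ I
    · simp [hmem]
    · have h0 : 0 ≤ i := hpos i List.mem_cons_self
      by_cases hij : (j : Int) = i
      · have : i.toNat = j := by omega
        simp [hij, this, hj]
      · have : i.toNat ≠ j := by omega
        simp [hmem, hij, this]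

lemma length_foldl_set (g : String) :
    ∀ (I : List Int) (res : List String),
      (I.foldl (fun r i => r.set i.toNat g) res).length = res.length := by
  intro I
  induction I with
  | nil => intro res; rfl
  | cons i I ih => intro res; rw [List.foldl_cons, ih]; simp

-- one guess revealed in a buffer that is a pointwise function of the word
lemma reveal_step (cs : List Char) (g : String) (h : Char → String) :
    (idxOf (PySem.List.enumerate cs 0) g).foldl (fun r i => r.set i.toNat g) (cs.map h)
      = cs.map (fun c => if String.ofList [c] = g then String.ofList [c] else h c) := by
  have hpos : ∀ i ∈ idxOf (PySem.List.enumerate cs 0) g, (0:Int) ≤ i := by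
    intro i hi
    rcases (mem_idxOf cs g i).mp hi with ⟨k, _, rfl, _⟩
    exact Int.natCast_nonneg k
  apply List.ext_getElem?
  intro j
  by_cases hj : j < cs.length
  · rw [foldl_set_getElem? g _ (cs.map h) hpos j (by simpa using hj)]
    by_cases hm : (j : Int) ∈ idxOf (PySem.List.enumerate cs 0) g
    · rcases (mem_idxOf cs g _).mp hm with ⟨k, hk, hjk, hg⟩
      have hkj : k = j := by exact_mod_cast hjk.symm
      subst hkj
      rw [if_pos hm]
      simp [hj, hg]
    · have hne : ¬ String.ofList [cs[j]] = g := by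
        intro hg
        exact hm ((mem_idxOf cs g _).mpr ⟨j, hj, rfl, hg⟩)
      rw [if_neg hm]
      simp [hj, hne]
  · have h1 : (cs.map h).length ≤ j := by simpa using Nat.le_of_not_lt hj
    rw [List.getElem?_eq_none (by simpa [length_foldl_set] using h1),
        List.getElem?_eq_none (by simpa using Nat.le_of_not_lt hj)]

-- the outer fold over any guess list, characterised as a map
lemma fold_reveal (cs : List Char) :
    ∀ (gs : List String) (h : Char → String),
      gs.foldl
        (fun res g => (idxOf (PySem.List.enumerate cs 0) g).foldl (fun r i => r.set i.toNat g) res)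
        (cs.map h)
        = cs.map (fun c => if String.ofList [c] ∈ gs then String.ofList [c] else h c) := by
  intro gs
  induction gs with
  | nil => intro h; simp
  | cons g gs ih =>
    intro h
    rw [List.foldl_cons, reveal_step cs g h, ih]
    apply List.map_congr_left
    intro c _
    by_cases h1 : String.ofList [c] = g <;> by_cases h2 : String.ofList [c] ∈ gs <;>
      simp [h1, h2]

-- ===== VERDICT (by name: the statement is the Claim_ definition above) =====
theorem recupMotMasque_spec : Claim_equal_recupMotMasque := by
  intro motComplet lettresTrouves _
  unfold Spec_recupMotMasque recupMotMasque recupMotMasque_alt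
  rw [fold_word lettresTrouves motComplet.toList ""]
  have hdict : ∀ g, ((PySem.List.enumerate motComplet.toList 0).foldl
      (fun d p => d.modify (String.ofList [p.2]) [] (fun xs => xs ++ [p.1]))
      PySem.Dict.empty).getD g [] = idxOf (PySem.List.enumerate motComplet.toList 0) g := by
    intro g
    rw [build_positions _ PySem.Dict.empty g]
    simp
  simp only [hdict]
  rw [show List.replicate motComplet.toList.length "*"
        = motComplet.toList.map (fun _ => "*") by simp [List.map_const']]
  rw [fold_reveal motComplet.toList (PySem.Set.ofList lettresTrouves) (fun _ => "*")]
  simp only [PySem.Set.mem_ofList]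
  apply String.toList_inj.mp
  rw [PySem.Str.toList_join, String.toList_ofList]
  rw [List.map_map]
  have hsing : (String.toList ∘ fun c => if String.ofList [c] ∈ lettresTrouves then String.ofList [c] else "*")
      = fun c => [if String.ofList [c] ∈ lettresTrouves then c else '*'] := by
    funext c
    by_cases h : String.ofList [c] ∈ lettresTrouves <;> simp [h]
  rw [hsing,
      show (fun c => [if String.ofList [c] ∈ lettresTrouves then c else '*'])
        = (fun cc => [cc]) ∘ (fun c => if String.ofList [c] ∈ lettresTrouves then c else '*') from rfl,
      ← List.map_map, show ("".toList : List Char) = [] from rfl,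
      PySem.Chars.join_nil_singletons]
  simp
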